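-- pv_equiv track=rewrite | github.com/tringm/TLDB-bak | src/lib/DeweyID.py | is_parent
-- ===== SOURCE A (Python) =====
-- def is_parent(id1: str, id2: str) -> bool:
--     """
--     This function checks if a Dewey ID is the parent of another Dewey ID
--     :param id1:
--     :param id2:
--     :return: True if id1 is the parent of id2
--     """
--     id1 = id1.split('.')
--     id2 = id2.split('.')
--     if len(id2) != (len(id1) + 1):
--         return False
--     # Compare element wise
--     for i in range(len(id1)):
--         if id1[i] != id2[i]:
--             return False
--     return True
-- ===== SOURCE B (Python) =====
-- def is_parent(id1: str, id2: str) -> bool: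
--     prefix = id1 + '.'
--     if not id2.startswith(prefix):
--         return False
--     return '.' not in id2[len(prefix):]
-- ===== Notes on version B (the rewrite author's own statement) =====
-- stated objective: idiomatic
-- what changed: B works on the raw strings: it checks that id2 starts with id1 plus a '.' and that the remainder contains no further '.', instead of splitting both ids into component lists and comparing them element-wise in an indexed loop.
import Mathlib
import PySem

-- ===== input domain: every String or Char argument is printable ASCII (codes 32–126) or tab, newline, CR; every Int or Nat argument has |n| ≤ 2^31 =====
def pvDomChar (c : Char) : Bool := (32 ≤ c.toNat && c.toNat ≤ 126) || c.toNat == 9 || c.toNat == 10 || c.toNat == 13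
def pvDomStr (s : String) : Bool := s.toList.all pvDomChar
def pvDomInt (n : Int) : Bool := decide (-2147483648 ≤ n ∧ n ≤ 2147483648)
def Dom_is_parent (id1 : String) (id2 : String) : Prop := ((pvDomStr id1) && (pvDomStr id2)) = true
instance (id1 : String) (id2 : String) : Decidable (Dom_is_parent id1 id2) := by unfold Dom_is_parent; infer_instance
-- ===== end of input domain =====

-- B checks id2 = id1 + '.' + (dot-free tail) on the raw strings (startswith + membership)
-- instead of splitting both ids and comparing components index-wise; same cost, more idiomatic.

-- ===== PORT A =====
-- id.split('.') with the non-empty separator '.' is exactly PySem.Chars.splitOn on the code points.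
def is_parent (id1 : String) (id2 : String) : Bool :=
  let l1 := PySem.Chars.splitOn id1.toList ['.']
  let l2 := PySem.Chars.splitOn id2.toList ['.']
  if l2.length ≠ l1.length + 1 then false
  else
    -- for i in range(len(l1)): if l1[i] != l2[i]: return False — an all-equal loop
    (PySem.List.pyRange 0 (l1.length : Int) 1).all
      (fun i => PySem.List.pyGetD l1 i [] == PySem.List.pyGetD l2 i [])

-- ===== PORT B =====
def is_parent_alt (id1 : String) (id2 : String) : Bool :=
  let pfx := id1.toList ++ ['.']          -- id1 + '.'
  if ¬ PySem.Chars.startswith id2.toList pfx then false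
  else
    -- '.' not in id2[len(prefix):]
    ! PySem.Chars.isIn ['.'] (PySem.List.slice id2.toList (some (pfx.length : Int)) none)

-- ===== PRECONDITION & SPEC =====
def Spec_is_parent (id1 : String) (id2 : String) (out : Bool) : Prop := out = is_parent_alt id1 id2
instance (id1 : String) (id2 : String) (out : Bool) : Decidable (Spec_is_parent id1 id2 out) := by unfold Spec_is_parent; infer_instance

-- ===== CLAIM (what is proved, stated in full; the proofs are below) =====
def Claim_equal_is_parent : Prop := ∀ (id1 : String) (id2 : String), Dom_is_parent id1 id2 → Spec_is_parent id1 id2 (is_parent id1 id2)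

-- ===== LEMMAS AND PROOFS =====

-- A simple structural model of s.split('.')
def splitDot : List Char → List (List Char)
  | [] => [[]]
  | c :: r => if c = '.' then [] :: splitDot r else (splitDot r).modifyHead (c :: ·)

theorem splitDot_ne_nil (s : List Char) : splitDot s ≠ [] := by
  cases s with
  | nil => simp [splitDot]
  | cons c r =>
    simp only [splitDot]
    split_ifs
    · simp
    · cases h : splitDot r with
      | nil => exact absurd h (splitDot_ne_nil r)
      | cons a t => simp [List.modifyHead]

theorem modifyHead_append_of_ne_nil {α : Type} (f : α → α) (l l' : List α) (h : l ≠ []) :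
    (l ++ l').modifyHead f = l.modifyHead f ++ l' := by
  cases l with
  | nil => exact absurd rfl h
  | cons a t => simp [List.modifyHead]

theorem go_eq_splitDot (s : List Char) : ∀ (fuel : Nat) (cur : List Char) (acc : List (List Char)),
    s.length < fuel →
    PySem.Chars.splitOn.go ['.'] fuel s cur acc
      = acc.reverse ++ (splitDot s).modifyHead (cur.reverse ++ ·) := by
  induction s with
  | nil =>
    intro fuel cur acc h
    match fuel with
    | fuel + 1 => simp [PySem.Chars.splitOn.go, splitDot, List.modifyHead]
  | cons c rest ih =>
    intro fuel cur acc h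
    match fuel with
    | fuel + 1 =>
      by_cases hc : c = '.'
      · subst hc
        have hp : (['.'] : List Char).isPrefixOf ('.' :: rest) = true := by
          simp [List.isPrefixOf]
        simp only [PySem.Chars.splitOn.go, hp, if_pos, List.length_cons, List.length_nil, List.drop_succ_cons,
          List.drop_zero]
        rw [ih fuel [] (cur.reverse :: acc) (by simpa using Nat.lt_of_succ_lt_succ h)]
        simp [splitDot, List.modifyHead]
        cases hr : splitDot rest with
        | nil => exact absurd hr (splitDot_ne_nil rest)
        | cons a t => simp
      · have hp : (['.'] : List Char).isPrefixOf (c :: rest) = false := by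
          simp [List.isPrefixOf]
          intro h'; exact absurd h'.symm hc
        simp only [PySem.Chars.splitOn.go, hp, Bool.false_eq_true, if_false]
        rw [ih fuel (c :: cur) acc (by simpa using Nat.lt_of_succ_lt_succ h)]
        simp only [splitDot, if_neg hc]
        cases hr : splitDot rest with
        | nil => exact absurd hr (splitDot_ne_nil rest)
        | cons a t => simp [List.modifyHead]

theorem splitOn_eq_splitDot (s : List Char) : PySem.Chars.splitOn s ['.'] = splitDot s := by
  unfold PySem.Chars.splitOn
  rw [go_eq_splitDot s (s.length + 1) [] [] (by omega)]
  cases h : splitDot s with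
  | nil => exact absurd h (splitDot_ne_nil s)
  | cons a t => simp [List.modifyHead]

theorem splitDot_append_dot (a b : List Char) :
    splitDot (a ++ '.' :: b) = splitDot a ++ splitDot b := by
  induction a with
  | nil => simp [splitDot]
  | cons c a' ih =>
    by_cases hc : c = '.'
    · subst hc; simp [splitDot, ih]
    · simp only [List.cons_append, splitDot, if_neg hc, ih]
      exact modifyHead_append_of_ne_nil _ _ _ (splitDot_ne_nil a')

theorem splitDot_of_not_mem (s : List Char) (h : '.' ∉ s) : splitDot s = [s] := by
  induction s with
  | nil => simp [splitDot]
  | cons c r ih =>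
    have hc : c ≠ '.' := fun hc => h (by simp [hc])
    simp only [splitDot, if_neg hc, ih (fun hm => h (by simp [hm])), List.modifyHead]

theorem not_dot_mem_of_mem_splitDot (s : List Char) (x : List Char) (hx : x ∈ splitDot s) :
    '.' ∉ x := by
  induction s generalizing x with
  | nil => simp [splitDot] at hx; simp [hx]
  | cons c r ih =>
    by_cases hc : c = '.'
    · subst hc
      simp [splitDot] at hx
      rcases hx with h | h
      · simp [h]
      · exact ih x h
    · simp only [splitDot, if_neg hc] at hx
      cases hr : splitDot r with
      | nil => exact absurd hr (splitDot_ne_nil r)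
      | cons a t =>
        rw [hr] at hx
        simp only [List.modifyHead, List.mem_cons] at hx
        rcases hx with h | h
        · subst h
          intro hm
          rcases List.mem_cons.mp hm with h' | h'
          · exact hc h'.symm
          · exact ih a (by rw [hr]; exact List.mem_cons_self) h'
        · exact ih x (by rw [hr]; exact List.mem_cons.mpr (Or.inr h))

def joinDot : List (List Char) → List Char
  | [] => []
  | [l] => l
  | l :: ls => l ++ '.' :: joinDot ls

theorem joinDot_append_singleton (L : List (List Char)) (x : List Char) (h : L ≠ []) :
    joinDot (L ++ [x]) = joinDot L ++ '.' :: x := by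
  induction L with
  | nil => exact absurd rfl h
  | cons a t ih =>
    cases t with
    | nil => simp [joinDot]
    | cons b t' =>
      have h2 := ih (by simp)
      have e1 : joinDot ((a :: b :: t') ++ [x]) = a ++ '.' :: joinDot ((b :: t') ++ [x]) := rfl
      have e2 : joinDot (a :: b :: t') = a ++ '.' :: joinDot (b :: t') := rfl
      rw [e1, h2, e2]
      simp

theorem joinDot_splitDot (s : List Char) : joinDot (splitDot s) = s := by
  induction s with
  | nil => simp [splitDot, joinDot]
  | cons c r ih =>
    by_cases hc : c = '.'
    · subst hc
      simp only [splitDot, reduceIte]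
      cases hr : splitDot r with
      | nil => exact absurd hr (splitDot_ne_nil r)
      | cons a t => rw [hr] at ih; simp [joinDot, ih]
    · simp only [splitDot, if_neg hc]
      cases hr : splitDot r with
      | nil => exact absurd hr (splitDot_ne_nil r)
      | cons a t =>
        rw [hr] at ih
        cases t with
        | nil => simp [joinDot, List.modifyHead] at ih ⊢; simp [ih]
        | cons b t' => simp [joinDot, List.modifyHead] at ih ⊢; simp [ih]

-- the central characterisation: the split lists extend by one component iff the strings do
theorem splitDot_extend_iff (s1 s2 x : List Char) :
    splitDot s2 = splitDot s1 ++ [x] ↔ s2 = s1 ++ '.' :: x ∧ '.' ∉ x := by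
  constructor
  · intro h
    have hx : '.' ∉ x := not_dot_mem_of_mem_splitDot s2 x (by rw [h]; simp)
    refine ⟨?_, hx⟩
    have := joinDot_splitDot s2
    rw [h, joinDot_append_singleton _ _ (splitDot_ne_nil s1), joinDot_splitDot] at this
    exact this.symm
  · rintro ⟨rfl, hx⟩
    rw [splitDot_append_dot, splitDot_of_not_mem x hx]

-- the element-wise loop condition, given the length relation, says exactly "L2 = L1 ++ [x]"
theorem prefix_exists_iff (L1 : List (List Char)) : ∀ (L2 : List (List Char)),
    L2.length = L1.length + 1 →
    ((∀ i : Nat, i < L1.length → L1.getD i [] = L2.getD i []) ↔ ∃ x, L2 = L1 ++ [x]) := by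
  induction L1 with
  | nil =>
    intro L2 hlen
    match L2, hlen with
    | [x], _ => simp
  | cons a t ih =>
    intro L2 hlen
    match L2 with
    | b :: L2' =>
      have hlen' : L2'.length = t.length + 1 := by simpa using hlen
      constructor
      · intro h
        have h0 : a = b := by simpa using h 0 (by simp)
        have h' : ∀ i : Nat, i < t.length → t.getD i [] = L2'.getD i [] := by
          intro i hi
          simpa using h (i + 1) (by simpa using Nat.succ_lt_succ hi)
        obtain ⟨x, hx⟩ := (ih L2' hlen').mp h'
        exact ⟨x, by simp [h0, hx]⟩
      · rintro ⟨x, hx⟩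
        simp only [List.cons_append, List.cons.injEq] at hx
        obtain ⟨rfl, hx⟩ := hx
        intro i hi
        match i with
        | 0 => rfl
        | i + 1 => exact (ih L2' hlen').mpr ⟨x, hx⟩ i (by simpa using Nat.lt_of_succ_lt_succ hi)

theorem is_parent_eq_alt (id1 id2 : String) : is_parent id1 id2 = is_parent_alt id1 id2 := by
  rw [Bool.eq_iff_iff]
  unfold is_parent is_parent_alt
  simp only [splitOn_eq_splitDot]
  set s1 := id1.toList
  set s2 := id2.toList
  constructor
  · intro h
    split_ifs at h with hlen
    have hall : ∀ i : Nat, i < (splitDot s1).length →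
        (splitDot s1).getD i [] = (splitDot s2).getD i [] := by
      intro i hi
      rw [PySem.List.pyRange_zero_natCast] at h
      have := List.all_eq_true.mp h (i : Int)
        (by simp only [List.mem_map]; exact ⟨i, by simpa using hi, rfl⟩)
      simpa [PySem.List.pyGetD_natCast] using this
    obtain ⟨x, hx⟩ := (prefix_exists_iff (splitDot s1) (splitDot s2) (by omega)).mp hall
    obtain ⟨h2, hxd⟩ := (splitDot_extend_iff s1 s2 x).mp hx
    have hpre : PySem.Chars.startswith s2 (s1 ++ ['.']) = true := by
      rw [h2, PySem.Chars.startswith]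
      exact List.isPrefixOf_iff_prefix.mpr ⟨x, by simp⟩
    rw [if_neg (by simp [hpre])]
    have hlenp : ((s1 ++ ['.']).length : Int) = ((s1.length + 1 : Nat) : Int) := by simp
    rw [hlenp, PySem.List.slice_from_natCast, h2]
    have hdrop : List.drop (s1.length + 1) (s1 ++ '.' :: x) = x := by
      rw [show s1 ++ '.' :: x = (s1 ++ ['.']) ++ x by simp,
        List.drop_append_of_le_length (by simp)]
      simp
    rw [Bool.not_eq_true', Bool.eq_false_iff, hdrop]
    intro hin
    rw [PySem.Chars.isIn_iff_infix, List.singleton_infix_iff] at hin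
    exact hxd hin
  · intro h
    split_ifs at h with hpre
    rw [Bool.not_eq_true', Bool.eq_false_iff, Ne, PySem.Chars.isIn_iff_infix,
      List.singleton_infix_iff] at h
    have hex : ∃ x, s2 = s1 ++ '.' :: x ∧ '.' ∉ x := by
      rw [PySem.Chars.startswith, List.isPrefixOf_iff_prefix] at hpre
      obtain ⟨r, hr⟩ := hpre
      refine ⟨r, by simp [← hr], ?_⟩
      intro hm
      apply h
      have hlenp : ((s1 ++ ['.']).length : Int) = ((s1.length + 1 : Nat) : Int) := by simp
      rw [hlenp, PySem.List.slice_from_natCast, ← hr,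
        List.drop_append_of_le_length (by simp)]
      simpa using hm
    obtain ⟨x, h2, hxd⟩ := hex
    have hx : splitDot s2 = splitDot s1 ++ [x] := (splitDot_extend_iff s1 s2 x).mpr ⟨h2, hxd⟩
    have hlen : (splitDot s2).length = (splitDot s1).length + 1 := by simp [hx]
    rw [if_neg (by omega)]
    rw [PySem.List.pyRange_zero_natCast]
    rw [List.all_eq_true]
    intro i hi
    simp only [List.mem_map, List.mem_range] at hi
    obtain ⟨n, hn, rfl⟩ := hi
    have := (prefix_exists_iff (splitDot s1) (splitDot s2) hlen).mpr ⟨x, hx⟩ n hn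
    simp only [PySem.List.pyGetD_natCast, beq_iff_eq]
    exact this

-- ===== VERDICT (by name: the statement is the Claim_ definition above) =====
theorem is_parent_spec : Claim_equal_is_parent := by
  intro id1 id2 _
  unfold Spec_is_parent
  exact is_parent_eq_alt id1 id2
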